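-- pv_equiv track=rewrite | github.com/rafikhouzam/git-tea | src/git_tea/signals.py | heat_word
-- ===== SOURCE A (Python) =====
-- def heat_word(score: int) -> str:
--     buckets = [
--         (2, "quiet whispers"),
--         (4, "light buzz"),
--         (6, "heating up"),
--         (8, "scorching"),
--         (10,"meltdown"),
--     ]
--     for cap, word in buckets:
--         if score <= cap:
--             return word
--     return "???"
-- ===== SOURCE B (Python) =====
-- def heat_word(score: int) -> str:
--     words = ["quiet whispers", "light buzz", "heating up", "scorching", "meltdown"]
--     idx = max(0, (score + 1) // 2 - 1)
--     return words[idx] if idx < 5 else "???"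
-- ===== Notes on version B (the rewrite author's own statement) =====
-- stated objective: idiomatic
-- what changed: Replaces the linear scan over the cap/word bucket list with a closed-form bucket index derived arithmetically from the uniform spacing of the caps, followed by a single list lookup.
import Mathlib
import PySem

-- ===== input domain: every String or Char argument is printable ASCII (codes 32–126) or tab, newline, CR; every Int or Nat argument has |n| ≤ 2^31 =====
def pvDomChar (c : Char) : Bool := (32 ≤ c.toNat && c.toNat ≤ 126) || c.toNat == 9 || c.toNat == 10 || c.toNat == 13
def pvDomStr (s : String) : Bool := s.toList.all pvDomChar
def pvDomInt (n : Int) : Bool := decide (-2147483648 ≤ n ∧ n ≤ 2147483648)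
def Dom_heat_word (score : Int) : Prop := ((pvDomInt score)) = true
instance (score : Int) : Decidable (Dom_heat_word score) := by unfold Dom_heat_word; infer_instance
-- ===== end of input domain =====

-- ===== PORT A =====
-- One honest line: B replaces A's bucket scan with a closed-form index into the word list (idiomatic, same cost).
def heat_word_scan (score : Int) : List (Int × String) → String
  | [] => "???"
  | (cap, word) :: rest => if score ≤ cap then word else heat_word_scan score rest

def heat_word (score : Int) : String :=
  heat_word_scan score [(2, "quiet whispers"), (4, "light buzz"), (6, "heating up"), (8, "scorching"), (10, "meltdown")]

-- ===== PORT B =====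
def heat_word_alt (score : Int) : String :=
  let words : List String := ["quiet whispers", "light buzz", "heating up", "scorching", "meltdown"]
  let idx : Int := max 0 (PySem.Int.floordiv (score + 1) 2 - 1)
  if idx < 5 then (PySem.List.pyGet? words idx).getD "" else "???"

-- ===== PRECONDITION & SPEC =====
def Spec_heat_word (score : Int) (out : String) : Prop := out = heat_word_alt score
instance (score : Int) (out : String) : Decidable (Spec_heat_word score out) := by unfold Spec_heat_word; infer_instance

-- ===== CLAIM (what is proved, stated in full; the proofs are below) =====
def Claim_equal_heat_word : Prop := ∀ (score : Int), Dom_heat_word score → Spec_heat_word score (heat_word score)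

-- ===== LEMMAS AND PROOFS =====

-- ===== VERDICT (by name: the statement is the Claim_ definition above) =====
theorem heat_word_spec : Claim_equal_heat_word := by
  intro score _
  unfold Spec_heat_word heat_word heat_word_alt
  simp only [heat_word_scan]
  rw [PySem.Int.floordiv_eq_ediv_of_pos (by omega)]
  rcases Int.lt_or_le 10 score with h | h
  · have : ¬ (max 0 ((score + 1) / 2 - 1) < 5) := by omega
    simp only [this, if_false]
    split_ifs <;> first | omega | rfl
  · rcases Int.lt_or_le 8 score with h9 | h8
    · have : max 0 ((score + 1) / 2 - 1) = 4 := by omega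
      rw [this]
      split_ifs <;> first | omega | rfl
    · rcases Int.lt_or_le 6 score with h7 | h6
      · have : max 0 ((score + 1) / 2 - 1) = 3 := by omega
        rw [this]
        split_ifs <;> first | omega | rfl
      · rcases Int.lt_or_le 4 score with h5 | h4
        · have : max 0 ((score + 1) / 2 - 1) = 2 := by omega
          rw [this]
          split_ifs <;> first | omega | rfl
        · rcases Int.lt_or_le 2 score with h3 | h2
          · have : max 0 ((score + 1) / 2 - 1) = 1 := by omega
            rw [this]
            split_ifs <;> first | omega | rfl
          · have : max 0 ((score + 1) / 2 - 1) = 0 := by omega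
            rw [this]
            split_ifs <;> first | omega | rfl
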